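-- pv_equiv track=rewrite | github.com/jier/docsible | docsible/analyzers/complexity_analyzer/integrations/providers.py | _detect_cloud_provider
-- ===== SOURCE A (Python) =====
-- def _detect_cloud_provider(modules: list[str]) -> str:
--     """Detect specific cloud provider from modules."""
--     if any("aws" in m or "ec2" in m or "s3" in m or "amazon" in m for m in modules):
--         return "AWS (Amazon Web Services)"
--     elif any("azure" in m for m in modules):
--         return "Microsoft Azure"
--     elif any("gcp" in m or "google.cloud" in m for m in modules):
--         return "Google Cloud Platform"
--     elif any("openstack" in m for m in modules):
--         return "OpenStack"
--     else:
--         return "Cloud Provider"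
-- ===== SOURCE B (Python) =====
-- def _detect_cloud_provider(modules: list[str]) -> str:
--     """Detect specific cloud provider from modules (single pass, minimum-rank accumulator)."""
--     best = 4
--     for m in modules:
--         if "aws" in m or "ec2" in m or "s3" in m or "amazon" in m:
--             r = 0
--         elif "azure" in m:
--             r = 1
--         elif "gcp" in m or "google.cloud" in m:
--             r = 2
--         elif "openstack" in m:
--             r = 3
--         else:
--             r = 4
--         if r < best:
--             best = r
--     if best == 0:
--         return "AWS (Amazon Web Services)"
--     elif best == 1:
--         return "Microsoft Azure"
--     elif best == 2:
--         return "Google Cloud Platform"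
--     elif best == 3:
--         return "OpenStack"
--     else:
--         return "Cloud Provider"
-- ===== Notes on version B (the rewrite author's own statement) =====
-- stated objective: alternative
-- what changed: Replaces A's four separate any-scans over the module list by a single pass that keeps the minimum provider rank (0=AWS,1=Azure,2=GCP,3=OpenStack,4=none) and maps it to the label at the end.
import Mathlib
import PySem

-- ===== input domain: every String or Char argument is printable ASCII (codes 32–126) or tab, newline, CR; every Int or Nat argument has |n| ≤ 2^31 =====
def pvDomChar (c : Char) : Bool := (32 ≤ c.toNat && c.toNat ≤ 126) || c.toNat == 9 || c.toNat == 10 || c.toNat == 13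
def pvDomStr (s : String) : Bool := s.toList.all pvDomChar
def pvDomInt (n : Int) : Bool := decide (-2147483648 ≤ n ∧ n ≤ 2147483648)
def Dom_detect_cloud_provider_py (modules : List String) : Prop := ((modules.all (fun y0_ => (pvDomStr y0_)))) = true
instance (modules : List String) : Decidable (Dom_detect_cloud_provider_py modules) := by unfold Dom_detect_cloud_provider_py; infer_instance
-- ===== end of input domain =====

-- B replaces A's four separate any-scans by a single pass keeping the minimum provider rank, mapped to its label at the end (alternative decomposition, same cost).


-- ===== PORT A =====
def detect_cloud_provider_py (modules : List String) : String :=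
  if modules.any (fun m => PySem.Str.isIn "aws" m || PySem.Str.isIn "ec2" m ||
      PySem.Str.isIn "s3" m || PySem.Str.isIn "amazon" m) then "AWS (Amazon Web Services)"
  else if modules.any (fun m => PySem.Str.isIn "azure" m) then "Microsoft Azure"
  else if modules.any (fun m => PySem.Str.isIn "gcp" m || PySem.Str.isIn "google.cloud" m) then
    "Google Cloud Platform"
  else if modules.any (fun m => PySem.Str.isIn "openstack" m) then "OpenStack"
  else "Cloud Provider"

-- ===== PORT B =====
def pvRank (m : String) : Nat :=
  if PySem.Str.isIn "aws" m || PySem.Str.isIn "ec2" m ||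
      PySem.Str.isIn "s3" m || PySem.Str.isIn "amazon" m then 0
  else if PySem.Str.isIn "azure" m then 1
  else if PySem.Str.isIn "gcp" m || PySem.Str.isIn "google.cloud" m then 2
  else if PySem.Str.isIn "openstack" m then 3
  else 4

def detect_cloud_provider_py_alt (modules : List String) : String :=
  let best := modules.foldl (fun best m => let r := pvRank m; if r < best then r else best) 4
  if best = 0 then "AWS (Amazon Web Services)"
  else if best = 1 then "Microsoft Azure"
  else if best = 2 then "Google Cloud Platform"
  else if best = 3 then "OpenStack"
  else "Cloud Provider"

-- ===== PRECONDITION & SPEC =====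
def Spec_detect_cloud_provider_py (modules : List String) (out : String) : Prop := out = detect_cloud_provider_py_alt modules
instance (modules : List String) (out : String) : Decidable (Spec_detect_cloud_provider_py modules out) := by unfold Spec_detect_cloud_provider_py; infer_instance

-- ===== CLAIM (what is proved, stated in full; the proofs are below) =====
def Claim_equal_detect_cloud_provider_py : Prop := ∀ (modules : List String), Dom_detect_cloud_provider_py modules → Spec_detect_cloud_provider_py modules (detect_cloud_provider_py modules)

-- ===== LEMMAS AND PROOFS =====
theorem pvRank_le (m : String) : pvRank m ≤ 4 := by
  unfold pvRank; split_ifs <;> omega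

theorem pvStep_eq_min (b : Nat) (m : String) :
    (let r := pvRank m; if r < b then r else b) = min (pvRank m) b := by
  simp only []; split_ifs <;> omega

theorem pvFoldl_acc (l : List String) : ∀ (a : Nat), a ≤ 4 →
    l.foldl (fun b m => min (pvRank m) b) a
      = min a (l.foldl (fun b m => min (pvRank m) b) 4) := by
  induction l with
  | nil => intro a ha; simp; omega
  | cons m rest ih =>
      intro a ha
      simp only [List.foldl_cons]
      rw [ih (min (pvRank m) a) (by have := pvRank_le m; omega),
          ih (min (pvRank m) 4) (by have := pvRank_le m; omega)]
      generalize rest.foldl _ 4 = M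
      omega

theorem pvCombine (b0 b1 b2 b3 c0 c1 c2 c3 : Bool) :
    min (if b0 then 0 else if b1 then 1 else if b2 then 2 else if b3 then 3 else 4)
        (if c0 then 0 else if c1 then 1 else if c2 then 2 else if c3 then 3 else 4)
      = (if (b0 || c0) then 0 else if (b1 || c1) then 1 else if (b2 || c2) then 2
          else if (b3 || c3) then 3 else (4 : Nat)) := by
  revert b0 b1 b2 b3 c0 c1 c2 c3; decide

theorem pvBest_char (l : List String) :
    l.foldl (fun b m => min (pvRank m) b) 4
      = (if l.any (fun m => PySem.Str.isIn "aws" m || PySem.Str.isIn "ec2" m ||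
            PySem.Str.isIn "s3" m || PySem.Str.isIn "amazon" m) then 0
        else if l.any (fun m => PySem.Str.isIn "azure" m) then 1
        else if l.any (fun m => PySem.Str.isIn "gcp" m || PySem.Str.isIn "google.cloud" m) then 2
        else if l.any (fun m => PySem.Str.isIn "openstack" m) then 3
        else 4) := by
  induction l with
  | nil => simp
  | cons m rest ih =>
      simp only [List.foldl_cons, List.any_cons]
      rw [pvFoldl_acc rest (min (pvRank m) 4) (by have := pvRank_le m; omega), ih]
      have h4 : min (pvRank m) 4 = pvRank m := by have := pvRank_le m; omega
      rw [h4]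
      unfold pvRank
      exact pvCombine _ _ _ _ _ _ _ _

-- ===== VERDICT (by name: the statement is the Claim_ definition above) =====
theorem detect_cloud_provider_py_spec : Claim_equal_detect_cloud_provider_py := by
  intro modules _
  unfold Spec_detect_cloud_provider_py detect_cloud_provider_py detect_cloud_provider_py_alt
  simp only [pvStep_eq_min, pvBest_char]
  cases h0 : modules.any (fun m => PySem.Str.isIn "aws" m || PySem.Str.isIn "ec2" m ||
      PySem.Str.isIn "s3" m || PySem.Str.isIn "amazon" m) <;>
    cases h1 : modules.any (fun m => PySem.Str.isIn "azure" m) <;>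
    cases h2 : modules.any (fun m => PySem.Str.isIn "gcp" m || PySem.Str.isIn "google.cloud" m) <;>
    cases h3 : modules.any (fun m => PySem.Str.isIn "openstack" m) <;>
    simp
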